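-- pv_equiv track=rewrite | github.com/pypi-data/pypi-mirror-391 | packages/importobot/importobot-0.1.4.tar.gz/importobot-0.1.4/src/importobot/core/templates/blueprints/registry.py | _identify_keyword_and_command
-- ===== SOURCE A (Python) =====
-- def _is_telnet_block(block: list[str]) -> bool:
--     """Detect whether the block is operating within a Telnet context."""
--     if not block:
--         return False
--     return "Telnet" in block[0]
--
-- def _identify_keyword_and_command(
--     block: list[str], base_library: str | None
-- ) -> tuple[str | None, str | None, str | None]:
--     """Return detected keyword, library, and command payload."""
--     telnet_context = _is_telnet_block(block)
--
--     for raw_line in block: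
--         stripped = raw_line.strip()
--         if stripped.startswith("Write"):
--             keyword = "Write"
--             library = base_library or "SSHLibrary"
--             command_line = stripped.split("Write", 1)[1].strip()
--         elif stripped.startswith("Execute Command"):
--             keyword = "Execute Command"
--             library = base_library or ("Telnet" if telnet_context else "SSHLibrary")
--             command_line = stripped.split("Execute Command", 1)[1].strip()
--         elif stripped.startswith("Run And Return Stdout"):
--             keyword = "Run And Return Stdout"
--             library = "OperatingSystem"
--             command_line = stripped.split("Run And Return Stdout", 1)[1].strip()
--         elif stripped.startswith("Run Process"):
--             keyword = "Run Process"
--             library = "Process"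
--             command_line = stripped.split("Run Process", 1)[1].strip()
--         elif stripped.startswith("Start Process"):
--             keyword = "Start Process"
--             library = "Process"
--             command_line = stripped.split("Start Process", 1)[1].strip()
--         elif stripped.startswith("Run "):
--             keyword = "Run"
--             library = "OperatingSystem"
--             command_line = stripped.split("Run", 1)[1].strip()
--         else:
--             continue
--
--         return keyword, library, command_line
--
--     return None, base_library, None
-- ===== SOURCE B (Python) =====
-- def _identify_keyword_and_command(block, base_library):
--     """Staged variant: for each rule, find its first matching line; then pick the
--     lexicographically smallest (line_index, rule_order) candidate."""
--     telnet = bool(block) and "Telnet" in block[0]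
--     rules = [
--         (0, "Write", "Write", base_library or "SSHLibrary"),
--         (1, "Execute Command", "Execute Command",
--          base_library or ("Telnet" if telnet else "SSHLibrary")),
--         (2, "Run And Return Stdout", "Run And Return Stdout", "OperatingSystem"),
--         (3, "Run Process", "Run Process", "Process"),
--         (4, "Start Process", "Start Process", "Process"),
--         (5, "Run ", "Run", "OperatingSystem"),
--     ]
--     stripped = [line.strip() for line in block]
--     best = None  # (line_index, rule_order, keyword, library, command)
--     for order, prefix, keyword, library in rules:
--         for i, s in enumerate(stripped):
--             if s.startswith(prefix):
--                 cand = (i, order, keyword, library, s[len(prefix):].strip())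
--                 if best is None or (cand[0], cand[1]) < (best[0], best[1]):
--                     best = cand
--                 break
--     if best is None:
--         return None, base_library, None
--     return best[2], best[3], best[4]
-- ===== Notes on version B (the rewrite author's own statement) =====
-- stated objective: alternative
-- what changed: Replaces A's single pass with a six-branch if/elif chain (first matching line, first matching branch wins) by a staged algorithm: one first-match scan of the stripped lines per rule, collecting per-rule candidates (line_index, rule_order, keyword, library, payload), then returning the lexicographically smallest (line_index, rule_order) candidate.
import Mathlib
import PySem

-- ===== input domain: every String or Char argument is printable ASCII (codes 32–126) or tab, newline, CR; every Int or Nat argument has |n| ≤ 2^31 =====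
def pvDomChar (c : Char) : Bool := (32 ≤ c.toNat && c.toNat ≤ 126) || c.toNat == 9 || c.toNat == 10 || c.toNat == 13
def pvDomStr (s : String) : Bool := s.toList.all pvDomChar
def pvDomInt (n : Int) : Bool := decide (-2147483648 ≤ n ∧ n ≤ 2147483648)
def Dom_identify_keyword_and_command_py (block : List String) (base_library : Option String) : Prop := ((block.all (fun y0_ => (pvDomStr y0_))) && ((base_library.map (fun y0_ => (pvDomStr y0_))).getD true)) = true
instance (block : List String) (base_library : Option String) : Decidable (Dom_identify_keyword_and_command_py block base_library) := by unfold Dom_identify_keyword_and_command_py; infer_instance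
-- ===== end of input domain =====

set_option maxHeartbeats 1000000


-- B replaces A's single-pass if/elif chain by staged per-rule first-match scans followed by a
-- lexicographic (line_index, rule_order) argmin (objective: alternative; same cost).

-- ===== PORT A =====
-- Python `x or d` for an optional string (None and "" are falsy)
def pyOrStr (x : Option String) (d : String) : String :=
  match x with
  | none => d
  | some s => if s = "" then d else s

-- s.split(sep, 1)[1]; in A this is only evaluated when sep occurs in s (the matched
-- prefix guarantees it), so the index 1 is always in range and getD is exact there
def pySplit1Tail (s sep : String) : String :=
  ((PySem.Str.splitMax? s sep 1).getD []).getD 1 ""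

def isTelnetBlockA (block : List String) : Bool :=
  match block with
  | [] => false
  | b0 :: _ => PySem.Str.isIn "Telnet" b0

def goA (telnet : Bool) (base : Option String) :
    List String → Option String × Option String × Option String
  | [] => (none, base, none)
  | raw :: rest =>
    let stripped := PySem.Str.strip raw
    if PySem.Str.startswith stripped "Write" then
      (some "Write", some (pyOrStr base "SSHLibrary"),
        some (PySem.Str.strip (pySplit1Tail stripped "Write")))
    else if PySem.Str.startswith stripped "Execute Command" then
      (some "Execute Command", some (pyOrStr base (if telnet then "Telnet" else "SSHLibrary")),
        some (PySem.Str.strip (pySplit1Tail stripped "Execute Command")))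
    else if PySem.Str.startswith stripped "Run And Return Stdout" then
      (some "Run And Return Stdout", some "OperatingSystem",
        some (PySem.Str.strip (pySplit1Tail stripped "Run And Return Stdout")))
    else if PySem.Str.startswith stripped "Run Process" then
      (some "Run Process", some "Process",
        some (PySem.Str.strip (pySplit1Tail stripped "Run Process")))
    else if PySem.Str.startswith stripped "Start Process" then
      (some "Start Process", some "Process",
        some (PySem.Str.strip (pySplit1Tail stripped "Start Process")))
    else if PySem.Str.startswith stripped "Run " then
      (some "Run", some "OperatingSystem",
        some (PySem.Str.strip (pySplit1Tail stripped "Run")))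
    else goA telnet base rest

def identify_keyword_and_command_py (block : List String) (base_library : Option String) :
    Option String × Option String × Option String :=
  goA (isTelnetBlockA block) base_library block

-- ===== PORT B =====
-- a candidate: (line_index, rule_order, keyword, library, command)
-- first-match scan of the stripped lines for one prefix (Source B's inner loop with break)
def bFind (pfx : String) : List String → Option (Nat × String)
  | [] => none
  | s :: rest =>
    if PySem.Str.startswith s pfx then some (0, s)
    else (bFind pfx rest).map (fun p => (p.1 + 1, p.2))

-- the candidate a rule contributes, if any
def bCand (pfx kw lib : String) (order : Nat) (stripped : List String) :
    Option (Nat × Nat × String × String × String) :=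
  (bFind pfx stripped).map (fun p =>
    (p.1, order, kw, lib,
      PySem.Str.strip (PySem.Str.slice p.2 (some (pfx.length : Int)) none)))

-- Python's (cand[0], cand[1]) < (best[0], best[1]) lexicographic tuple comparison
def bBetter (c b : Nat × Nat × String × String × String) : Bool :=
  decide (c.1 < b.1) || (decide (c.1 = b.1) && decide (c.2.1 < b.2.1))

-- Source B's conditional update of `best`
def bMerge (best : Option (Nat × Nat × String × String × String))
    (c? : Option (Nat × Nat × String × String × String)) :
    Option (Nat × Nat × String × String × String) :=
  match c?, best with
  | none, b => b
  | some c, none => some c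
  | some c, some b => if bBetter c b then some c else some b

def rulesB (telnet : Bool) (base : Option String) : List (Nat × String × String × String) :=
  [(0, "Write", "Write", pyOrStr base "SSHLibrary"),
   (1, "Execute Command", "Execute Command",
      pyOrStr base (if telnet then "Telnet" else "SSHLibrary")),
   (2, "Run And Return Stdout", "Run And Return Stdout", "OperatingSystem"),
   (3, "Run Process", "Run Process", "Process"),
   (4, "Start Process", "Start Process", "Process"),
   (5, "Run ", "Run", "OperatingSystem")]

def renderB (base : Option String) :
    Option (Nat × Nat × String × String × String) →
      Option String × Option String × Option String
  | none => (none, base, none)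
  | some c => (some c.2.2.1, some c.2.2.2.1, some c.2.2.2.2)

def identify_keyword_and_command_py_alt (block : List String) (base_library : Option String) :
    Option String × Option String × Option String :=
  let telnet := match block with
    | [] => false
    | b0 :: _ => PySem.Str.isIn "Telnet" b0
  let stripped := block.map PySem.Str.strip
  let best := (rulesB telnet base_library).foldl
    (fun b r => bMerge b (bCand r.2.1 r.2.2.1 r.2.2.2 r.1 stripped)) none
  renderB base_library best

-- ===== PRECONDITION & SPEC =====
def Spec_identify_keyword_and_command_py (block : List String) (base_library : Option String) (out : Option String × Option String × Option String) : Prop := out = identify_keyword_and_command_py_alt block base_library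
instance (block : List String) (base_library : Option String) (out : Option String × Option String × Option String) : Decidable (Spec_identify_keyword_and_command_py block base_library out) := by unfold Spec_identify_keyword_and_command_py; infer_instance

-- ===== CLAIM (what is proved, stated in full; the proofs are below) =====
def Claim_equal_identify_keyword_and_command_py : Prop := ∀ (block : List String) (base_library : Option String), Dom_identify_keyword_and_command_py block base_library → Spec_identify_keyword_and_command_py block base_library (identify_keyword_and_command_py block base_library)

-- ===== LEMMAS AND PROOFS =====

theorem str_eq_of_toList {a b : String} (h : a.toList = b.toList) : a = b := by
  have h2 := congrArg String.ofList h
  simpa using h2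

theorem go_mzero (sep : List Char) (fuel : Nat) (l cur : List Char) (acc : List (List Char)) :
    PySem.Chars.splitOnMax.go sep fuel 0 l cur acc = ((cur.reverse ++ l) :: acc).reverse := by
  cases fuel with
  | zero => rfl
  | succ n => cases l <;> simp [PySem.Chars.splitOnMax.go]

theorem go_step (sep : List Char) (fuel m : Nat) (c : Char) (l cur : List Char)
    (acc : List (List Char)) (hm : m ≠ 0) (hp : sep.isPrefixOf (c :: l) = true) :
    PySem.Chars.splitOnMax.go sep (fuel+1) m (c::l) cur acc
      = PySem.Chars.splitOnMax.go sep fuel (m-1) ((c::l).drop sep.length) [] (cur.reverse :: acc) := by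
  simp [PySem.Chars.splitOnMax.go, hm, hp]

theorem splitOnMax_one_of_prefix (sep tail : List Char) (hne : sep ≠ []) :
    PySem.Chars.splitOnMax (sep ++ tail) sep 1 = [[], tail] := by
  unfold PySem.Chars.splitOnMax
  rw [if_neg (by norm_num : ¬ ((1:Int) < 0))]
  obtain ⟨c, cs, rfl⟩ := List.exists_cons_of_ne_nil hne
  have hp : (c :: cs).isPrefixOf ((c :: cs) ++ tail) = true := by
    simp [List.isPrefixOf_iff_prefix]
  simp only [List.cons_append, List.length_cons, List.length_append]
  rw [show ((1:Int).toNat) = 1 from rfl]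
  rw [show cs.length + tail.length + 1 + 1 = ((cs ++ tail).length + 1) + 1 by simp]
  rw [go_step (c::cs) ((cs ++ tail).length + 1) 1 c (cs ++ tail) [] [] (by omega)
      (by simpa using hp)]
  rw [go_mzero]
  simp [List.drop_left]

theorem pySplit1Tail_of_prefix (s sep : String) (hne : sep.toList ≠ [])
    (hp : sep.toList <+: s.toList) :
    (pySplit1Tail s sep).toList = s.toList.drop sep.toList.length := by
  obtain ⟨tail, htail⟩ := hp
  unfold pySplit1Tail PySem.Str.splitMax? PySem.Chars.splitMax?
  rw [if_neg (by simpa [List.isEmpty_iff] using hne)]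
  rw [← htail, splitOnMax_one_of_prefix sep.toList tail hne]
  simp [List.drop_left]

-- A's command payload for the first five rules equals B's
theorem payload_eq (s sep : String) (hne : sep.toList ≠ [])
    (hp : PySem.Str.startswith s sep = true) :
    PySem.Str.strip (pySplit1Tail s sep)
      = PySem.Str.strip (PySem.Str.slice s (some (sep.length : Int)) none) := by
  have hp' : sep.toList <+: s.toList := (PySem.Chars.startswith_iff _ _).mp (by simpa using hp)
  apply str_eq_of_toList
  rw [PySem.Str.toList_strip, PySem.Str.toList_strip]
  congr 1
  rw [pySplit1Tail_of_prefix s sep hne hp']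
  have hb : (PySem.Str.slice s (some (sep.length : Int)) none).toList
      = s.toList.drop sep.length := by
    simp [PySem.Str.toList_slice, PySem.Chars.slice_eq_listSlice, PySem.List.slice_from]
  rw [hb]
  simp

-- A's "Run " rule: A splits off after "Run", B after "Run "; stripping makes them equal
theorem payload_run_eq (s : String) (hp : PySem.Str.startswith s "Run " = true) :
    PySem.Str.strip (pySplit1Tail s "Run")
      = PySem.Str.strip (PySem.Str.slice s (some (("Run ").length : Int)) none) := by
  have hp' : ("Run ").toList <+: s.toList := (PySem.Chars.startswith_iff _ _).mp (by simpa using hp)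
  obtain ⟨tail, htail⟩ := hp'
  have hp3 : ("Run").toList <+: s.toList := by
    rw [← htail]; exact ⟨' ' :: tail, by simp⟩
  apply str_eq_of_toList
  rw [PySem.Str.toList_strip, PySem.Str.toList_strip]
  rw [pySplit1Tail_of_prefix s "Run" (by decide) hp3]
  have hl4 : ("Run " : String).length = 4 := by decide
  have hb : (PySem.Str.slice s (some (("Run ").length : Int)) none).toList
      = s.toList.drop 4 := by
    simp [PySem.Str.toList_slice, PySem.Chars.slice_eq_listSlice, PySem.List.slice_from, hl4]
  rw [hb, ← htail]
  show PySem.Chars.strip (List.drop 3 ((['R', 'u', 'n', ' ']) ++ tail)) = _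
  simp only [List.cons_append, List.nil_append, List.drop_succ_cons, List.drop_zero]
  have hsp : PySem.Chars.strip (' ' :: tail) = PySem.Chars.strip tail := by
    simp [PySem.Chars.strip, PySem.Chars.lstrip, List.dropWhile, PySem.Chars.isspace]
  exact hsp

-- index shift corresponding to prepending one unmatched line
def shiftC (c : Nat × Nat × String × String × String) : Nat × Nat × String × String × String :=
  (c.1 + 1, c.2)

theorem bBetter_shift (c b : Nat × Nat × String × String × String) :
    bBetter (shiftC c) (shiftC b) = bBetter c b := by
  by_cases h1 : c.1 < b.1
  · simp [bBetter, shiftC, h1, (by omega : c.1 + 1 < b.1 + 1)]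
  · by_cases h2 : c.1 = b.1
    · simp [bBetter, shiftC, h1, h2, (by omega : ¬ c.1 + 1 < b.1 + 1)]
    · simp [bBetter, shiftC, h1, h2, (by omega : ¬ c.1 + 1 < b.1 + 1),
        (by omega : ¬ c.1 + 1 = b.1 + 1)]

theorem bMerge_shift (b c? : Option (Nat × Nat × String × String × String)) :
    bMerge (b.map shiftC) (c?.map shiftC) = (bMerge b c?).map shiftC := by
  cases c? with
  | none => cases b <;> rfl
  | some c =>
    cases b with
    | none => rfl
    | some b' =>
      simp only [Option.map_some, bMerge, bBetter_shift]
      by_cases h : bBetter c b' = true <;> simp [h]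

theorem foldl_shift_none (l : List (Option (Nat × Nat × String × String × String))) :
    (l.map (Option.map shiftC)).foldl bMerge none = (l.foldl bMerge none).map shiftC := by
  have aux : ∀ (l : List (Option (Nat × Nat × String × String × String)))
      (acc : Option (Nat × Nat × String × String × String)),
      (l.map (Option.map shiftC)).foldl bMerge (acc.map shiftC)
        = (l.foldl bMerge acc).map shiftC := by
    intro l
    induction l with
    | nil => intro acc; rfl
    | cons c? rest ih =>
      intro acc
      simp only [List.map_cons, List.foldl_cons]
      rw [bMerge_shift, ih]
  simpa using aux l none

theorem renderB_shift (base : Option String)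
    (x : Option (Nat × Nat × String × String × String)) :
    renderB base (x.map shiftC) = renderB base x := by
  cases x <;> rfl

-- an unmatched head line shifts a rule's candidate
theorem bCand_cons_neg (pfx kw lib : String) (o : Nat) (s : String) (rest : List String)
    (h : PySem.Str.startswith s pfx = false) :
    bCand pfx kw lib o (s :: rest) = (bCand pfx kw lib o rest).map shiftC := by
  have h' : PySem.Chars.startswith s.toList pfx.toList = false := by simpa using h
  cases hf : bFind pfx rest <;> simp [bCand, bFind, h', hf, shiftC]

-- a matched head line gives candidate index 0
theorem bCand_cons_pos (pfx kw lib : String) (o : Nat) (s : String) (rest : List String)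
    (h : PySem.Str.startswith s pfx = true) :
    bCand pfx kw lib o (s :: rest)
      = some (0, o, kw, lib,
          PySem.Str.strip (PySem.Str.slice s (some (pfx.length : Int)) none)) := by
  have h' : PySem.Chars.startswith s.toList pfx.toList = true := by simpa using h
  simp [bCand, bFind, h']

-- folding candidates whose order is not below the best's keeps an index-0 best
theorem foldl_keep (b : Nat × Nat × String × String × String)
    (hb : b.1 = 0) (l : List (Option (Nat × Nat × String × String × String)))
    (h : ∀ c? ∈ l, ∀ c ∈ c?, ¬ c.2.1 < b.2.1) :
    l.foldl bMerge (some b) = some b := by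
  induction l with
  | nil => rfl
  | cons c? rest ih =>
    have hc := h c? (List.mem_cons_self ..)
    have hstep : bMerge (some b) c? = some b := by
      cases c? with
      | none => rfl
      | some c =>
        have hc' := hc c rfl
        simp [bMerge, bBetter, hb, hc']
    rw [List.foldl_cons, hstep]
    exact ih (fun x hx => h x (List.mem_cons_of_mem _ hx))

-- folding positive-index candidates from `none` yields none or a positive-index best
theorem foldl_pos (l : List (Option (Nat × Nat × String × String × String)))
    (acc : Option (Nat × Nat × String × String × String))
    (hacc : ∀ c ∈ acc, 1 ≤ c.1)
    (h : ∀ c? ∈ l, ∀ c ∈ c?, 1 ≤ c.1) :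
    ∀ c ∈ l.foldl bMerge acc, 1 ≤ c.1 := by
  induction l generalizing acc with
  | nil => exact hacc
  | cons c? rest ih =>
    rw [List.foldl_cons]
    apply ih
    · intro c hc
      have hhead := h c? (List.mem_cons_self ..)
      cases c? with
      | none => exact hacc c hc
      | some c' =>
        have hc' := hhead c' rfl
        cases acc with
        | none => simp [bMerge] at hc; subst hc; exact hc'
        | some b =>
          simp only [bMerge] at hc
          split at hc
          · simp at hc; subst hc; exact hc'
          · simp at hc; subst hc; exact hacc b rfl
    · exact fun x hx => h x (List.mem_cons_of_mem _ hx)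

-- an index-0 candidate beats a positive-index (or absent) best
theorem bMerge_win (B0 : Option (Nat × Nat × String × String × String))
    (h : ∀ b ∈ B0, 1 ≤ b.1) (c : Nat × Nat × String × String × String) (hc : c.1 = 0) :
    bMerge B0 (some c) = some c := by
  cases B0 with
  | none => rfl
  | some b =>
    have hb := h b rfl
    simp [bMerge, bBetter, hc, Nat.lt_of_lt_of_le Nat.zero_lt_one hb]

-- the candidate of rule `o` carries order `o`
theorem bCand_order (pfx kw lib : String) (o : Nat) (str : List String) :
    ∀ c ∈ bCand pfx kw lib o str, c.2.1 = o := by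
  cases h : bFind pfx str <;> simp [bCand, h]

-- any shifted candidate has a positive index
theorem shift_pos (d : Option (Nat × Nat × String × String × String)) :
    ∀ x ∈ d.map shiftC, 1 ≤ x.1 := by
  cases d <;> simp [shiftC]

-- pre-rules give positive indices, the matched rule wins at index 0, later rules cannot beat it
theorem fold_general (pre post : List (Option (Nat × Nat × String × String × String)))
    (c : Nat × Nat × String × String × String) (hc : c.1 = 0)
    (hpre : ∀ c? ∈ pre, ∀ x ∈ c?, 1 ≤ x.1)
    (hpost : ∀ c? ∈ post, ∀ x ∈ c?, ¬ x.2.1 < c.2.1) :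
    (pre ++ some c :: post).foldl bMerge none = some c := by
  rw [List.foldl_append, List.foldl_cons]
  rw [bMerge_win _ (foldl_pos pre none (by simp) hpre) c hc]
  exact foldl_keep c hc post hpost

theorem goA_eq (t : Bool) (base : Option String) (lines : List String) :
    goA t base lines
      = renderB base (((rulesB t base).map
          (fun r => bCand r.2.1 r.2.2.1 r.2.2.2 r.1 (lines.map PySem.Str.strip))).foldl bMerge none) := by
  induction lines with
  | nil => rfl
  | cons raw rest ih =>
    simp only [List.map_cons]
    set s := PySem.Str.strip raw with hs
    set str' := rest.map PySem.Str.strip with hstr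
    simp only [rulesB, List.map_cons, List.map_nil]
    by_cases h1 : PySem.Str.startswith s "Write" = true
    · rw [bCand_cons_pos _ _ _ _ _ _ h1]
      rw [show ([some (0, 0, "Write", (pyOrStr base "SSHLibrary"), PySem.Str.strip (PySem.Str.slice s (some (("Write" : String).length : Int)) none)), bCand "Execute Command" "Execute Command" (pyOrStr base (if t then "Telnet" else "SSHLibrary")) 1 (s :: str'), bCand "Run And Return Stdout" "Run And Return Stdout" "OperatingSystem" 2 (s :: str'), bCand "Run Process" "Run Process" "Process" 3 (s :: str'), bCand "Start Process" "Start Process" "Process" 4 (s :: str'), bCand "Run " "Run" "OperatingSystem" 5 (s :: str')] : List (Option (Nat × Nat × String × String × String)))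
            = [] ++ some (0, 0, "Write", (pyOrStr base "SSHLibrary"), PySem.Str.strip (PySem.Str.slice s (some (("Write" : String).length : Int)) none)) :: [bCand "Execute Command" "Execute Command" (pyOrStr base (if t then "Telnet" else "SSHLibrary")) 1 (s :: str'), bCand "Run And Return Stdout" "Run And Return Stdout" "OperatingSystem" 2 (s :: str'), bCand "Run Process" "Run Process" "Process" 3 (s :: str'), bCand "Start Process" "Start Process" "Process" 4 (s :: str'), bCand "Run " "Run" "OperatingSystem" 5 (s :: str')] from rfl]
      rw [fold_general [] [bCand "Execute Command" "Execute Command" (pyOrStr base (if t then "Telnet" else "SSHLibrary")) 1 (s :: str'), bCand "Run And Return Stdout" "Run And Return Stdout" "OperatingSystem" 2 (s :: str'), bCand "Run Process" "Run Process" "Process" 3 (s :: str'), bCand "Start Process" "Start Process" "Process" 4 (s :: str'), bCand "Run " "Run" "OperatingSystem" 5 (s :: str')] _ rfl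
          (by simp)
          (by intro c? hc? x hx; simp only [List.mem_cons, List.not_mem_nil, or_false] at hc?; rcases hc? with rfl|rfl|rfl|rfl|rfl <;> (have hord := bCand_order _ _ _ _ _ x hx; simp [hord]))]
      simp only [goA]
      rw [← hs, if_pos h1]
      rw [payload_eq s "Write" (by decide) h1]
      rfl
    by_cases h2 : PySem.Str.startswith s "Execute Command" = true
    · rw [bCand_cons_pos _ _ _ _ _ _ h2]
      rw [bCand_cons_neg "Write" "Write" (pyOrStr base "SSHLibrary") 0 s str' (by simpa using h1)]
      rw [show ([(bCand "Write" "Write" (pyOrStr base "SSHLibrary") 0 str').map shiftC, some (0, 1, "Execute Command", (pyOrStr base (if t then "Telnet" else "SSHLibrary")), PySem.Str.strip (PySem.Str.slice s (some (("Execute Command" : String).length : Int)) none)), bCand "Run And Return Stdout" "Run And Return Stdout" "OperatingSystem" 2 (s :: str'), bCand "Run Process" "Run Process" "Process" 3 (s :: str'), bCand "Start Process" "Start Process" "Process" 4 (s :: str'), bCand "Run " "Run" "OperatingSystem" 5 (s :: str')] : List (Option (Nat × Nat × String × String × String)))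
            = [(bCand "Write" "Write" (pyOrStr base "SSHLibrary") 0 str').map shiftC] ++ some (0, 1, "Execute Command", (pyOrStr base (if t then "Telnet" else "SSHLibrary")), PySem.Str.strip (PySem.Str.slice s (some (("Execute Command" : String).length : Int)) none)) :: [bCand "Run And Return Stdout" "Run And Return Stdout" "OperatingSystem" 2 (s :: str'), bCand "Run Process" "Run Process" "Process" 3 (s :: str'), bCand "Start Process" "Start Process" "Process" 4 (s :: str'), bCand "Run " "Run" "OperatingSystem" 5 (s :: str')] from rfl]
      rw [fold_general [(bCand "Write" "Write" (pyOrStr base "SSHLibrary") 0 str').map shiftC] [bCand "Run And Return Stdout" "Run And Return Stdout" "OperatingSystem" 2 (s :: str'), bCand "Run Process" "Run Process" "Process" 3 (s :: str'), bCand "Start Process" "Start Process" "Process" 4 (s :: str'), bCand "Run " "Run" "OperatingSystem" 5 (s :: str')] _ rfl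
          (by intro c? hc? x hx; simp only [List.mem_cons, List.not_mem_nil, or_false] at hc?; rcases hc? with rfl <;> exact shift_pos _ x hx)
          (by intro c? hc? x hx; simp only [List.mem_cons, List.not_mem_nil, or_false] at hc?; rcases hc? with rfl|rfl|rfl|rfl <;> (have hord := bCand_order _ _ _ _ _ x hx; simp [hord]))]
      simp only [goA]
      rw [← hs, if_neg ((Bool.not_eq_true _).mpr (by simpa using h1) : ¬ (PySem.Str.startswith s "Write" = true)), if_pos h2]
      rw [payload_eq s "Execute Command" (by decide) h2]
      rfl
    by_cases h3 : PySem.Str.startswith s "Run And Return Stdout" = true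
    · rw [bCand_cons_pos _ _ _ _ _ _ h3]
      rw [bCand_cons_neg "Write" "Write" (pyOrStr base "SSHLibrary") 0 s str' (by simpa using h1)]
      rw [bCand_cons_neg "Execute Command" "Execute Command" (pyOrStr base (if t then "Telnet" else "SSHLibrary")) 1 s str' (by simpa using h2)]
      rw [show ([(bCand "Write" "Write" (pyOrStr base "SSHLibrary") 0 str').map shiftC, (bCand "Execute Command" "Execute Command" (pyOrStr base (if t then "Telnet" else "SSHLibrary")) 1 str').map shiftC, some (0, 2, "Run And Return Stdout", "OperatingSystem", PySem.Str.strip (PySem.Str.slice s (some (("Run And Return Stdout" : String).length : Int)) none)), bCand "Run Process" "Run Process" "Process" 3 (s :: str'), bCand "Start Process" "Start Process" "Process" 4 (s :: str'), bCand "Run " "Run" "OperatingSystem" 5 (s :: str')] : List (Option (Nat × Nat × String × String × String)))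
            = [(bCand "Write" "Write" (pyOrStr base "SSHLibrary") 0 str').map shiftC, (bCand "Execute Command" "Execute Command" (pyOrStr base (if t then "Telnet" else "SSHLibrary")) 1 str').map shiftC] ++ some (0, 2, "Run And Return Stdout", "OperatingSystem", PySem.Str.strip (PySem.Str.slice s (some (("Run And Return Stdout" : String).length : Int)) none)) :: [bCand "Run Process" "Run Process" "Process" 3 (s :: str'), bCand "Start Process" "Start Process" "Process" 4 (s :: str'), bCand "Run " "Run" "OperatingSystem" 5 (s :: str')] from rfl]
      rw [fold_general [(bCand "Write" "Write" (pyOrStr base "SSHLibrary") 0 str').map shiftC, (bCand "Execute Command" "Execute Command" (pyOrStr base (if t then "Telnet" else "SSHLibrary")) 1 str').map shiftC] [bCand "Run Process" "Run Process" "Process" 3 (s :: str'), bCand "Start Process" "Start Process" "Process" 4 (s :: str'), bCand "Run " "Run" "OperatingSystem" 5 (s :: str')] _ rfl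
          (by intro c? hc? x hx; simp only [List.mem_cons, List.not_mem_nil, or_false] at hc?; rcases hc? with rfl|rfl <;> exact shift_pos _ x hx)
          (by intro c? hc? x hx; simp only [List.mem_cons, List.not_mem_nil, or_false] at hc?; rcases hc? with rfl|rfl|rfl <;> (have hord := bCand_order _ _ _ _ _ x hx; simp [hord]))]
      simp only [goA]
      rw [← hs, if_neg ((Bool.not_eq_true _).mpr (by simpa using h1) : ¬ (PySem.Str.startswith s "Write" = true)), if_neg ((Bool.not_eq_true _).mpr (by simpa using h2) : ¬ (PySem.Str.startswith s "Execute Command" = true)), if_pos h3]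
      rw [payload_eq s "Run And Return Stdout" (by decide) h3]
      rfl
    by_cases h4 : PySem.Str.startswith s "Run Process" = true
    · rw [bCand_cons_pos _ _ _ _ _ _ h4]
      rw [bCand_cons_neg "Write" "Write" (pyOrStr base "SSHLibrary") 0 s str' (by simpa using h1)]
      rw [bCand_cons_neg "Execute Command" "Execute Command" (pyOrStr base (if t then "Telnet" else "SSHLibrary")) 1 s str' (by simpa using h2)]
      rw [bCand_cons_neg "Run And Return Stdout" "Run And Return Stdout" "OperatingSystem" 2 s str' (by simpa using h3)]
      rw [show ([(bCand "Write" "Write" (pyOrStr base "SSHLibrary") 0 str').map shiftC, (bCand "Execute Command" "Execute Command" (pyOrStr base (if t then "Telnet" else "SSHLibrary")) 1 str').map shiftC, (bCand "Run And Return Stdout" "Run And Return Stdout" "OperatingSystem" 2 str').map shiftC, some (0, 3, "Run Process", "Process", PySem.Str.strip (PySem.Str.slice s (some (("Run Process" : String).length : Int)) none)), bCand "Start Process" "Start Process" "Process" 4 (s :: str'), bCand "Run " "Run" "OperatingSystem" 5 (s :: str')] : List (Option (Nat × Nat × String × String × String)))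
            = [(bCand "Write" "Write" (pyOrStr base "SSHLibrary") 0 str').map shiftC, (bCand "Execute Command" "Execute Command" (pyOrStr base (if t then "Telnet" else "SSHLibrary")) 1 str').map shiftC, (bCand "Run And Return Stdout" "Run And Return Stdout" "OperatingSystem" 2 str').map shiftC] ++ some (0, 3, "Run Process", "Process", PySem.Str.strip (PySem.Str.slice s (some (("Run Process" : String).length : Int)) none)) :: [bCand "Start Process" "Start Process" "Process" 4 (s :: str'), bCand "Run " "Run" "OperatingSystem" 5 (s :: str')] from rfl]
      rw [fold_general [(bCand "Write" "Write" (pyOrStr base "SSHLibrary") 0 str').map shiftC, (bCand "Execute Command" "Execute Command" (pyOrStr base (if t then "Telnet" else "SSHLibrary")) 1 str').map shiftC, (bCand "Run And Return Stdout" "Run And Return Stdout" "OperatingSystem" 2 str').map shiftC] [bCand "Start Process" "Start Process" "Process" 4 (s :: str'), bCand "Run " "Run" "OperatingSystem" 5 (s :: str')] _ rfl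
          (by intro c? hc? x hx; simp only [List.mem_cons, List.not_mem_nil, or_false] at hc?; rcases hc? with rfl|rfl|rfl <;> exact shift_pos _ x hx)
          (by intro c? hc? x hx; simp only [List.mem_cons, List.not_mem_nil, or_false] at hc?; rcases hc? with rfl|rfl <;> (have hord := bCand_order _ _ _ _ _ x hx; simp [hord]))]
      simp only [goA]
      rw [← hs, if_neg ((Bool.not_eq_true _).mpr (by simpa using h1) : ¬ (PySem.Str.startswith s "Write" = true)), if_neg ((Bool.not_eq_true _).mpr (by simpa using h2) : ¬ (PySem.Str.startswith s "Execute Command" = true)), if_neg ((Bool.not_eq_true _).mpr (by simpa using h3) : ¬ (PySem.Str.startswith s "Run And Return Stdout" = true)), if_pos h4]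
      rw [payload_eq s "Run Process" (by decide) h4]
      rfl
    by_cases h5 : PySem.Str.startswith s "Start Process" = true
    · rw [bCand_cons_pos _ _ _ _ _ _ h5]
      rw [bCand_cons_neg "Write" "Write" (pyOrStr base "SSHLibrary") 0 s str' (by simpa using h1)]
      rw [bCand_cons_neg "Execute Command" "Execute Command" (pyOrStr base (if t then "Telnet" else "SSHLibrary")) 1 s str' (by simpa using h2)]
      rw [bCand_cons_neg "Run And Return Stdout" "Run And Return Stdout" "OperatingSystem" 2 s str' (by simpa using h3)]
      rw [bCand_cons_neg "Run Process" "Run Process" "Process" 3 s str' (by simpa using h4)]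
      rw [show ([(bCand "Write" "Write" (pyOrStr base "SSHLibrary") 0 str').map shiftC, (bCand "Execute Command" "Execute Command" (pyOrStr base (if t then "Telnet" else "SSHLibrary")) 1 str').map shiftC, (bCand "Run And Return Stdout" "Run And Return Stdout" "OperatingSystem" 2 str').map shiftC, (bCand "Run Process" "Run Process" "Process" 3 str').map shiftC, some (0, 4, "Start Process", "Process", PySem.Str.strip (PySem.Str.slice s (some (("Start Process" : String).length : Int)) none)), bCand "Run " "Run" "OperatingSystem" 5 (s :: str')] : List (Option (Nat × Nat × String × String × String)))
            = [(bCand "Write" "Write" (pyOrStr base "SSHLibrary") 0 str').map shiftC, (bCand "Execute Command" "Execute Command" (pyOrStr base (if t then "Telnet" else "SSHLibrary")) 1 str').map shiftC, (bCand "Run And Return Stdout" "Run And Return Stdout" "OperatingSystem" 2 str').map shiftC, (bCand "Run Process" "Run Process" "Process" 3 str').map shiftC] ++ some (0, 4, "Start Process", "Process", PySem.Str.strip (PySem.Str.slice s (some (("Start Process" : String).length : Int)) none)) :: [bCand "Run " "Run" "OperatingSystem" 5 (s :: str')] from rfl]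
      rw [fold_general [(bCand "Write" "Write" (pyOrStr base "SSHLibrary") 0 str').map shiftC, (bCand "Execute Command" "Execute Command" (pyOrStr base (if t then "Telnet" else "SSHLibrary")) 1 str').map shiftC, (bCand "Run And Return Stdout" "Run And Return Stdout" "OperatingSystem" 2 str').map shiftC, (bCand "Run Process" "Run Process" "Process" 3 str').map shiftC] [bCand "Run " "Run" "OperatingSystem" 5 (s :: str')] _ rfl
          (by intro c? hc? x hx; simp only [List.mem_cons, List.not_mem_nil, or_false] at hc?; rcases hc? with rfl|rfl|rfl|rfl <;> exact shift_pos _ x hx)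
          (by intro c? hc? x hx; simp only [List.mem_cons, List.not_mem_nil, or_false] at hc?; rcases hc? with rfl <;> (have hord := bCand_order _ _ _ _ _ x hx; simp [hord]))]
      simp only [goA]
      rw [← hs, if_neg ((Bool.not_eq_true _).mpr (by simpa using h1) : ¬ (PySem.Str.startswith s "Write" = true)), if_neg ((Bool.not_eq_true _).mpr (by simpa using h2) : ¬ (PySem.Str.startswith s "Execute Command" = true)), if_neg ((Bool.not_eq_true _).mpr (by simpa using h3) : ¬ (PySem.Str.startswith s "Run And Return Stdout" = true)), if_neg ((Bool.not_eq_true _).mpr (by simpa using h4) : ¬ (PySem.Str.startswith s "Run Process" = true)), if_pos h5]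
      rw [payload_eq s "Start Process" (by decide) h5]
      rfl
    by_cases h6 : PySem.Str.startswith s "Run " = true
    · rw [bCand_cons_pos _ _ _ _ _ _ h6]
      rw [bCand_cons_neg "Write" "Write" (pyOrStr base "SSHLibrary") 0 s str' (by simpa using h1)]
      rw [bCand_cons_neg "Execute Command" "Execute Command" (pyOrStr base (if t then "Telnet" else "SSHLibrary")) 1 s str' (by simpa using h2)]
      rw [bCand_cons_neg "Run And Return Stdout" "Run And Return Stdout" "OperatingSystem" 2 s str' (by simpa using h3)]
      rw [bCand_cons_neg "Run Process" "Run Process" "Process" 3 s str' (by simpa using h4)]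
      rw [bCand_cons_neg "Start Process" "Start Process" "Process" 4 s str' (by simpa using h5)]
      rw [show ([(bCand "Write" "Write" (pyOrStr base "SSHLibrary") 0 str').map shiftC, (bCand "Execute Command" "Execute Command" (pyOrStr base (if t then "Telnet" else "SSHLibrary")) 1 str').map shiftC, (bCand "Run And Return Stdout" "Run And Return Stdout" "OperatingSystem" 2 str').map shiftC, (bCand "Run Process" "Run Process" "Process" 3 str').map shiftC, (bCand "Start Process" "Start Process" "Process" 4 str').map shiftC, some (0, 5, "Run", "OperatingSystem", PySem.Str.strip (PySem.Str.slice s (some (("Run " : String).length : Int)) none))] : List (Option (Nat × Nat × String × String × String)))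
            = [(bCand "Write" "Write" (pyOrStr base "SSHLibrary") 0 str').map shiftC, (bCand "Execute Command" "Execute Command" (pyOrStr base (if t then "Telnet" else "SSHLibrary")) 1 str').map shiftC, (bCand "Run And Return Stdout" "Run And Return Stdout" "OperatingSystem" 2 str').map shiftC, (bCand "Run Process" "Run Process" "Process" 3 str').map shiftC, (bCand "Start Process" "Start Process" "Process" 4 str').map shiftC] ++ some (0, 5, "Run", "OperatingSystem", PySem.Str.strip (PySem.Str.slice s (some (("Run " : String).length : Int)) none)) :: [] from rfl]
      rw [fold_general [(bCand "Write" "Write" (pyOrStr base "SSHLibrary") 0 str').map shiftC, (bCand "Execute Command" "Execute Command" (pyOrStr base (if t then "Telnet" else "SSHLibrary")) 1 str').map shiftC, (bCand "Run And Return Stdout" "Run And Return Stdout" "OperatingSystem" 2 str').map shiftC, (bCand "Run Process" "Run Process" "Process" 3 str').map shiftC, (bCand "Start Process" "Start Process" "Process" 4 str').map shiftC] [] _ rfl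
          (by intro c? hc? x hx; simp only [List.mem_cons, List.not_mem_nil, or_false] at hc?; rcases hc? with rfl|rfl|rfl|rfl|rfl <;> exact shift_pos _ x hx)
          (by simp)]
      simp only [goA]
      rw [← hs, if_neg ((Bool.not_eq_true _).mpr (by simpa using h1) : ¬ (PySem.Str.startswith s "Write" = true)), if_neg ((Bool.not_eq_true _).mpr (by simpa using h2) : ¬ (PySem.Str.startswith s "Execute Command" = true)), if_neg ((Bool.not_eq_true _).mpr (by simpa using h3) : ¬ (PySem.Str.startswith s "Run And Return Stdout" = true)), if_neg ((Bool.not_eq_true _).mpr (by simpa using h4) : ¬ (PySem.Str.startswith s "Run Process" = true)), if_neg ((Bool.not_eq_true _).mpr (by simpa using h5) : ¬ (PySem.Str.startswith s "Start Process" = true)), if_pos h6]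
      rw [payload_run_eq s h6]
      rfl
    · -- no rule matches the head line: every candidate shifts and the head is skipped
      rw [bCand_cons_neg "Write" "Write" (pyOrStr base "SSHLibrary") 0 s str' (by simpa using h1)]
      rw [bCand_cons_neg "Execute Command" "Execute Command" (pyOrStr base (if t then "Telnet" else "SSHLibrary")) 1 s str' (by simpa using h2)]
      rw [bCand_cons_neg "Run And Return Stdout" "Run And Return Stdout" "OperatingSystem" 2 s str' (by simpa using h3)]
      rw [bCand_cons_neg "Run Process" "Run Process" "Process" 3 s str' (by simpa using h4)]
      rw [bCand_cons_neg "Start Process" "Start Process" "Process" 4 s str' (by simpa using h5)]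
      rw [bCand_cons_neg "Run " "Run" "OperatingSystem" 5 s str' (by simpa using h6)]
      rw [show ([(bCand "Write" "Write" (pyOrStr base "SSHLibrary") 0 str').map shiftC, (bCand "Execute Command" "Execute Command" (pyOrStr base (if t then "Telnet" else "SSHLibrary")) 1 str').map shiftC, (bCand "Run And Return Stdout" "Run And Return Stdout" "OperatingSystem" 2 str').map shiftC, (bCand "Run Process" "Run Process" "Process" 3 str').map shiftC, (bCand "Start Process" "Start Process" "Process" 4 str').map shiftC, (bCand "Run " "Run" "OperatingSystem" 5 str').map shiftC] : List (Option (Nat × Nat × String × String × String)))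
            = ([bCand "Write" "Write" (pyOrStr base "SSHLibrary") 0 str', bCand "Execute Command" "Execute Command" (pyOrStr base (if t then "Telnet" else "SSHLibrary")) 1 str', bCand "Run And Return Stdout" "Run And Return Stdout" "OperatingSystem" 2 str', bCand "Run Process" "Run Process" "Process" 3 str', bCand "Start Process" "Start Process" "Process" 4 str', bCand "Run " "Run" "OperatingSystem" 5 str'] : List (Option (Nat × Nat × String × String × String))).map (Option.map shiftC) from rfl]
      rw [foldl_shift_none, renderB_shift]
      simp only [goA]
      rw [← hs, if_neg ((Bool.not_eq_true _).mpr (by simpa using h1) : ¬ (PySem.Str.startswith s "Write" = true)), if_neg ((Bool.not_eq_true _).mpr (by simpa using h2) : ¬ (PySem.Str.startswith s "Execute Command" = true)), if_neg ((Bool.not_eq_true _).mpr (by simpa using h3) : ¬ (PySem.Str.startswith s "Run And Return Stdout" = true)), if_neg ((Bool.not_eq_true _).mpr (by simpa using h4) : ¬ (PySem.Str.startswith s "Run Process" = true)), if_neg ((Bool.not_eq_true _).mpr (by simpa using h5) : ¬ (PySem.Str.startswith s "Start Process" = true)), if_neg ((Bool.not_eq_true _).mpr (by simpa using h6) : ¬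 (PySem.Str.startswith s "Run " = true))]
      rw [ih]
      simp only [rulesB, List.map_cons, List.map_nil]


-- ===== VERDICT (by name: the statement is the Claim_ definition above) =====
theorem identify_keyword_and_command_py_spec : Claim_equal_identify_keyword_and_command_py := by
  intro block base _
  unfold Spec_identify_keyword_and_command_py
  unfold identify_keyword_and_command_py identify_keyword_and_command_py_alt
  rw [goA_eq, List.foldl_map]
  rfl
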